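-- pv_equiv track=rewrite | github.com/joeeasterly/go | bin/one_offs/generate_ids.py | encode_base32
-- ===== SOURCE A (Python) =====
-- BASE32_CHARS = "123456789abcdefghjkmnpqrstuvwxyz"
--
-- def encode_base32(number):
--     if number == 0:
--         return BASE32_CHARS[0]
--
--     encoding = ''
--     while number > 0:
--         remainder = number % 32
--         encoding = BASE32_CHARS[remainder] + encoding
--         number //= 32
--     return encoding
-- ===== SOURCE B (Python) =====
-- BASE32_CHARS = "123456789abcdefghjkmnpqrstuvwxyz"
--
-- def encode_base32(number):
--     if number <= 0:
--         return BASE32_CHARS[0] if number == 0 else ''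
--     p = 1
--     while p * 32 <= number:
--         p *= 32
--     encoded = ''
--     while p > 0:
--         encoded += BASE32_CHARS[(number // p) % 32]
--         p //= 32
--     return encoded
-- ===== Notes on version B (the rewrite author's own statement) =====
-- stated objective: alternative
-- what changed: Instead of A's single loop that prepends the least-significant digit and divides the number, B first finds the largest power of 32 not exceeding the number and then extracts digits most-significant-first by dividing by descending powers, appending to the output.
import Mathlib
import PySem

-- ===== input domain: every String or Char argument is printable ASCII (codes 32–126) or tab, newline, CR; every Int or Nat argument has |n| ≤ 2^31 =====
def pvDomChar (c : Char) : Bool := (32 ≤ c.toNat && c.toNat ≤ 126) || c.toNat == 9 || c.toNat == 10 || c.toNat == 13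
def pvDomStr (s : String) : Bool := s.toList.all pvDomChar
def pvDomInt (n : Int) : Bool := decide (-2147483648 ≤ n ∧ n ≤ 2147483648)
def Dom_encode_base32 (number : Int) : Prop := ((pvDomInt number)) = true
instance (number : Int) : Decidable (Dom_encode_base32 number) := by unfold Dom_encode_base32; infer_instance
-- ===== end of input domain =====

-- B replaces A's least-significant-first prepend loop by finding the largest power of 32
-- ≤ number and extracting digits most-significant-first (alternative decomposition, same cost).

def base32Chars : String := "123456789abcdefghjkmnpqrstuvwxyz"

-- shared by both ports: BASE32_CHARS[d] as a one-character string (d always lands in [0,32))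
def digitStr (d : Int) : String := ((PySem.Str.pyGet? base32Chars d).getD ' ').toString

-- ===== PORT A =====
-- while number > 0: prepend BASE32_CHARS[number % 32]; number //= 32
def encodeLoop (number : Int) (encoding : String) : String :=
  if number > 0 then
    encodeLoop (PySem.Int.floordiv number 32)
      (digitStr (PySem.Int.mod number 32) ++ encoding)
  else encoding
termination_by number.toNat
decreasing_by
  simp [PySem.Int.floordiv]
  rw [Int.fdiv_eq_ediv]
  simp
  omega

def encode_base32 (number : Int) : String :=
  if number == 0 then digitStr 0
  else encodeLoop number ""

-- ===== PORT B =====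
-- p = 1; while p * 32 <= number: p *= 32      (the '0 < p' conjunct only makes the recursion total;
-- B's Python always calls it with p ≥ 1, where it is vacuous)
def growPow (p number : Int) : Int :=
  if h : 0 < p ∧ p * 32 ≤ number then growPow (p * 32) number else p
termination_by (number - p).toNat
decreasing_by
  obtain ⟨h1, h2⟩ := h
  omega

-- while p > 0: encoded += BASE32_CHARS[(number // p) % 32]; p //= 32
def extractLoop (p number : Int) (encoded : String) : String :=
  if p > 0 then
    extractLoop (PySem.Int.floordiv p 32) number
      (encoded ++ digitStr (PySem.Int.mod (PySem.Int.floordiv number p) 32))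
  else encoded
termination_by p.toNat
decreasing_by
  simp [PySem.Int.floordiv]
  rw [Int.fdiv_eq_ediv]
  simp
  omega

def encode_base32_alt (number : Int) : String :=
  if number ≤ 0 then (if number == 0 then digitStr 0 else "")
  else extractLoop (growPow 1 number) number ""

-- ===== PRECONDITION & SPEC =====
def Spec_encode_base32 (number : Int) (out : String) : Prop := out = encode_base32_alt number
instance (number : Int) (out : String) : Decidable (Spec_encode_base32 number out) := by unfold Spec_encode_base32; infer_instance

-- ===== CLAIM (what is proved, stated in full; the proofs are below) =====
def Claim_equal_encode_base32 : Prop := ∀ (number : Int), Dom_encode_base32 number → Spec_encode_base32 number (encode_base32 number)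

-- ===== LEMMAS AND PROOFS =====

-- canonical digit string of n (empty for n ≤ 0), used to relate the two loops
def repS (n : Int) : String :=
  if n > 0 then repS (PySem.Int.floordiv n 32) ++ digitStr (PySem.Int.mod n 32) else ""
termination_by n.toNat
decreasing_by
  simp [PySem.Int.floordiv]
  rw [Int.fdiv_eq_ediv]
  simp
  omega

theorem encodeLoop_eq (n : Int) (e : String) : encodeLoop n e = repS n ++ e := by
  rw [encodeLoop, repS]
  split
  · rw [encodeLoop_eq (PySem.Int.floordiv n 32)]
    apply String.ext; simp
  · simp
termination_by n.toNat
decreasing_by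
  simp [PySem.Int.floordiv]
  rw [Int.fdiv_eq_ediv]
  simp
  omega

theorem extractLoop_acc (p n : Int) (e : String) :
    extractLoop p n e = e ++ extractLoop p n "" := by
  conv_lhs => rw [extractLoop]
  conv_rhs => rw [extractLoop]
  split
  · rw [extractLoop_acc (PySem.Int.floordiv p 32) n
        (e ++ digitStr (PySem.Int.mod (PySem.Int.floordiv n p) 32)),
      extractLoop_acc (PySem.Int.floordiv p 32) n
        (("" : String) ++ digitStr (PySem.Int.mod (PySem.Int.floordiv n p) 32))]
    apply String.ext; simp
  · apply String.ext; simp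
termination_by p.toNat
decreasing_by
  all_goals (simp [PySem.Int.floordiv]; rw [Int.fdiv_eq_ediv]; simp; omega)

theorem fd32 (a : Int) : PySem.Int.floordiv a 32 = a / 32 :=
  PySem.Int.floordiv_eq_ediv_of_pos (by norm_num)

-- shift: extracting over 32^(k+1) equals extracting n//32 over 32^k then the last digit n%32
theorem fd1 (a : Int) : PySem.Int.floordiv a 1 = a := by
  rw [PySem.Int.floordiv_eq_ediv_of_pos (by norm_num)]; simp

theorem extract_shift (k : ℕ) (n : Int) :
    extractLoop ((32:Int)^(k+1)) n "" =
      extractLoop ((32:Int)^k) (PySem.Int.floordiv n 32) "" ++ digitStr (PySem.Int.mod n 32) := by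
  induction k generalizing n with
  | zero =>
    simp only [zero_add, pow_one, pow_zero]
    conv_lhs => rw [extractLoop]
    rw [if_pos (by norm_num)]
    rw [show PySem.Int.floordiv (32:Int) 32 = 1 by rw [fd32]; norm_num]
    conv_lhs => rw [extractLoop]
    rw [if_pos (by norm_num)]
    rw [show PySem.Int.floordiv (1:Int) 32 = 0 by rw [fd32]; norm_num]
    conv_lhs => rw [extractLoop]
    rw [if_neg (by norm_num)]
    conv_rhs => rw [extractLoop]
    rw [if_pos (by norm_num)]
    rw [show PySem.Int.floordiv (1:Int) 32 = 0 by rw [fd32]; norm_num]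
    conv_rhs => rw [extractLoop]
    rw [if_neg (by norm_num)]
    rw [fd1, fd1]
  | succ k ih =>
    have hpow : (0:Int) < 32^(k+1+1) := by positivity
    conv_lhs => rw [extractLoop]
    rw [if_pos hpow]
    rw [show PySem.Int.floordiv ((32:Int)^(k+1+1)) 32 = 32^(k+1) by
      rw [fd32, pow_succ]; rw [Int.mul_ediv_cancel _ (by norm_num)]]
    rw [extractLoop_acc, ih n]
    conv_rhs => rw [extractLoop]
    rw [if_pos (by positivity)]
    rw [show PySem.Int.floordiv ((32:Int)^(k+1)) 32 = 32^k by
      rw [fd32, pow_succ]; rw [Int.mul_ediv_cancel _ (by norm_num)]]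
    rw [show PySem.Int.floordiv (PySem.Int.floordiv n 32) ((32:Int)^(k+1)) =
          PySem.Int.floordiv n ((32:Int)^(k+1+1)) by
      rw [fd32, PySem.Int.floordiv_eq_ediv_of_pos (by positivity),
        PySem.Int.floordiv_eq_ediv_of_pos (by positivity),
        Int.ediv_ediv_of_nonneg (by norm_num)]
      ring_nf]
    conv_rhs => rw [extractLoop_acc]
    apply String.ext; simp

-- main: if 32^k ≤ n < 32^(k+1) then extraction produces repS n
theorem extract_repS (k : ℕ) (n : Int) (h1 : (32:Int)^k ≤ n) (h2 : n < (32:Int)^(k+1)) :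
    extractLoop ((32:Int)^k) n "" = repS n := by
  induction k generalizing n with
  | zero =>
    simp only [pow_zero] at h1 h2 ⊢
    conv_lhs => rw [extractLoop]
    rw [if_pos (by norm_num)]
    rw [show PySem.Int.floordiv (1:Int) 32 = 0 by rw [fd32]; norm_num]
    conv_lhs => rw [extractLoop]
    rw [if_neg (by norm_num)]
    rw [fd1]
    rw [repS, if_pos (by omega)]
    rw [show PySem.Int.floordiv n 32 = 0 by rw [fd32]; omega]
    rw [repS, if_neg (by norm_num)]
  | succ k ih =>
    rw [extract_shift k n]
    have hd : (32:Int)^k ≤ PySem.Int.floordiv n 32 ∧ PySem.Int.floordiv n 32 < 32^(k+1) := by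
      rw [fd32]
      constructor
      · rw [Int.le_ediv_iff_mul_le (by norm_num)]
        calc (32:Int)^k * 32 = 32^(k+1) := by ring
        _ ≤ n := h1
      · rw [Int.ediv_lt_iff_lt_mul (by norm_num)]
        calc n < (32:Int)^(k+1+1) := h2
        _ = 32^(k+1) * 32 := by ring
    rw [ih _ hd.1 hd.2]
    have hn : n > 0 := lt_of_lt_of_le (by positivity) h1
    conv_rhs => rw [repS]
    rw [if_pos hn]

-- growPow from a power of 32 below n lands on the largest power of 32 ≤ n
theorem growPow_spec (n p : Int) (hp : 0 < p) (hpn : p ≤ n) (hpow : ∃ j : ℕ, p = (32:Int)^j) :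
    growPow p n ≤ n ∧ n < 32 * growPow p n ∧ ∃ j : ℕ, growPow p n = (32:Int)^j := by
  rw [growPow]
  split
  · next h =>
    obtain ⟨j, hj⟩ := hpow
    exact growPow_spec n (p * 32) (by omega) (by omega) ⟨j + 1, by rw [hj]; ring⟩
  · next h =>
    refine ⟨hpn, by omega, hpow⟩
termination_by (n - p).toNat
decreasing_by omega

-- ===== VERDICT (by name: the statement is the Claim_ definition above) =====
theorem encode_base32_spec : Claim_equal_encode_base32 := by
  intro number _
  unfold Spec_encode_base32 encode_base32 encode_base32_alt
  rcases lt_trichotomy number 0 with hlt | heq | hgt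
  · have h0 : ¬((number == 0) = true) := by simp; omega
    rw [if_neg h0, if_pos (by omega : number ≤ 0), if_neg h0]
    rw [encodeLoop_eq, repS, if_neg (by omega)]
    apply String.ext; simp
  · subst heq; rfl
  · have h0 : ¬((number == 0) = true) := by simp; omega
    rw [if_neg h0, if_neg (by omega : ¬ number ≤ 0)]
    obtain ⟨hle, hlt32, j, hj⟩ := growPow_spec number 1 (by norm_num) (by omega) ⟨0, by norm_num⟩
    rw [hj] at hle hlt32 ⊢
    rw [extract_repS j number hle (by calc number < 32 * 32^j := hlt32
          _ = 32^(j+1) := by ring)]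
    rw [encodeLoop_eq]
    apply String.ext; simp
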